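-- pv_equiv track=rewrite | github.com/immanuelle-leonhart/Gaiad-and-Literature-work | gedcom_tools/p39_category_exporter.py | check_p39_classifications
-- ===== SOURCE A (Python) =====
-- NO_IDENTIFIERS_QID = "Q153721"  # Individual without identifiers
--
-- NO_RELATIVES_QID = "Q153722"    # People without relatives
--
-- def check_p39_classifications(properties):
--     """Check which P39 classifications an entity has"""
--     has_no_identifiers = False
--     has_no_relatives = False
--
--     if 'P39' in properties:
--         for claim in properties['P39']:
--             value = claim.get('value', '')
--             if isinstance(value, dict):
--                 value = value.get('id', '')
--
--             if value == NO_IDENTIFIERS_QID: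
--                 has_no_identifiers = True
--             elif value == NO_RELATIVES_QID:
--                 has_no_relatives = True
--
--     return has_no_identifiers, has_no_relatives
-- ===== SOURCE B (Python) =====
-- NO_IDENTIFIERS_QID = "Q153721"  # Individual without identifiers
--
-- NO_RELATIVES_QID = "Q153722"    # People without relatives
--
--
-- def _scan(claims, has_no_identifiers, has_no_relatives):
--     """Recursive scan with early exit once both classifications are found."""
--     if (has_no_identifiers and has_no_relatives) or not claims:
--         return has_no_identifiers, has_no_relatives
--     value = claims[0].get('value', '')
--     if isinstance(value, dict):
--         value = value.get('id', '')
--     return _scan(claims[1:],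
--                  has_no_identifiers or value == NO_IDENTIFIERS_QID,
--                  has_no_relatives or value == NO_RELATIVES_QID)
--
--
-- def check_p39_classifications(properties):
--     """Check which P39 classifications an entity has"""
--     return _scan(properties.get('P39', []), False, False)
-- ===== Notes on version B (the rewrite author's own statement) =====
-- stated objective: alternative
-- what changed: Replaces A's full-pass loop with mutable flags and an elif chain by a recursive scan that threads both flags as accumulators and terminates early as soon as both classifications have been found (and handles the missing 'P39' key via .get instead of a membership guard).
import Mathlib
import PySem

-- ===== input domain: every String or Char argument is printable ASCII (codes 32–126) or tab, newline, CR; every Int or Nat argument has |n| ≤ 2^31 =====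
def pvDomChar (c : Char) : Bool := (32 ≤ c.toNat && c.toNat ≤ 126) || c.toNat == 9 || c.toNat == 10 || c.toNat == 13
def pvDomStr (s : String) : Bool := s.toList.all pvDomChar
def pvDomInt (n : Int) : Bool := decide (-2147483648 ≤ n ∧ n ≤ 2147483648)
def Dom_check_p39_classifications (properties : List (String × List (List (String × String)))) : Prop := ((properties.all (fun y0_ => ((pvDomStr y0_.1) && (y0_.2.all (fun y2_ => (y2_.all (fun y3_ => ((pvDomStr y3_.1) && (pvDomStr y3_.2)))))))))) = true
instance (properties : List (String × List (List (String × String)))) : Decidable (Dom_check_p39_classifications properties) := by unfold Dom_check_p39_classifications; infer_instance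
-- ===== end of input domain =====

-- ===== PORT A =====
-- B replaces A's full-pass flag loop by a recursive scan that threads both flags and stops early once both are found (alternative decomposition).
-- In this typed domain claim values are strings, so Python's `isinstance(value, dict)` branch is always False in both programs.
def check_p39_classifications (properties : List (String × List (List (String × String)))) : Bool × Bool :=
  match PySem.Dict.get? (PySem.Dict.mk properties) "P39" with
  | none => (false, false)
  | some claims =>
    claims.foldl (fun st claim =>
      let value := PySem.Dict.getD (PySem.Dict.mk claim) "value" ""
      if value = "Q153721" then (true, st.2)
      else if value = "Q153722" then (st.1, true)
      else st) (false, false)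

-- ===== PORT B =====
-- recursive scan with early exit once both classifications are found
def p39_scan : List (List (String × String)) → Bool → Bool → Bool × Bool
  | claims, noId, noRel =>
    if noId && noRel then (noId, noRel)
    else match claims with
      | [] => (noId, noRel)
      | c :: rest =>
        let value := PySem.Dict.getD (PySem.Dict.mk c) "value" ""
        p39_scan rest (noId || value == "Q153721") (noRel || value == "Q153722")

def check_p39_classifications_alt (properties : List (String × List (List (String × String)))) : Bool × Bool :=
  p39_scan (PySem.Dict.getD (PySem.Dict.mk properties) "P39" []) false false

-- ===== PRECONDITION & SPEC =====
def Spec_check_p39_classifications (properties : List (String × List (List (String × String)))) (out : Bool × Bool) : Prop := out = check_p39_classifications_alt properties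
instance (properties : List (String × List (List (String × String)))) (out : Bool × Bool) : Decidable (Spec_check_p39_classifications properties out) := by unfold Spec_check_p39_classifications; infer_instance

-- ===== CLAIM (what is proved, stated in full; the proofs are below) =====
def Claim_equal_check_p39_classifications : Prop := ∀ (properties : List (String × List (List (String × String)))), Dom_check_p39_classifications properties → Spec_check_p39_classifications properties (check_p39_classifications properties)

-- ===== LEMMAS AND PROOFS =====
-- A's flag-setting fold, characterised: each flag is its start value OR "some claim's value equals the QID".
theorem p39_foldl_flags (claims : List (List (String × String))) (b1 b2 : Bool) :
    claims.foldl (fun st claim =>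
      if PySem.Dict.getD (PySem.Dict.mk claim) "value" "" = "Q153721" then (true, st.2)
      else if PySem.Dict.getD (PySem.Dict.mk claim) "value" "" = "Q153722" then (st.1, true)
      else st) (b1, b2)
    = (b1 || claims.any (fun c => PySem.Dict.getD (PySem.Dict.mk c) "value" "" == "Q153721"),
       b2 || claims.any (fun c => PySem.Dict.getD (PySem.Dict.mk c) "value" "" == "Q153722")) := by
  induction claims generalizing b1 b2 with
  | nil => simp
  | cons c cs ih =>
    simp only [List.foldl_cons, List.any_cons]
    split_ifs with h1 h2
    · rw [ih]; simp [h1]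
    · rw [ih]; simp [h2]
    · rw [ih]
      rw [beq_eq_false_iff_ne.mpr h1, beq_eq_false_iff_ne.mpr h2]
      simp

-- B's early-exit recursive scan, characterised the same way.
theorem p39_scan_flags (claims : List (List (String × String))) (b1 b2 : Bool) :
    p39_scan claims b1 b2
    = (b1 || claims.any (fun c => PySem.Dict.getD (PySem.Dict.mk c) "value" "" == "Q153721"),
       b2 || claims.any (fun c => PySem.Dict.getD (PySem.Dict.mk c) "value" "" == "Q153722")) := by
  induction claims generalizing b1 b2 with
  | nil => rw [p39_scan]; simp
  | cons c cs ih =>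
    rw [p39_scan]
    by_cases hb : b1 && b2
    · obtain ⟨h1, h2⟩ := Bool.and_eq_true_iff.mp hb
      simp [h1, h2]
    · simp only [hb]
      rw [ih]
      simp [Bool.or_assoc]

-- ===== VERDICT (by name: the statement is the Claim_ definition above) =====
theorem check_p39_classifications_spec : Claim_equal_check_p39_classifications := by
  intro properties _
  unfold Spec_check_p39_classifications
  simp only [check_p39_classifications, check_p39_classifications_alt]
  cases hg : PySem.Dict.get? (PySem.Dict.mk properties) "P39" with
  | none =>
    simp [PySem.Dict.getD, hg, p39_scan]
  | some claims =>
    have hd : PySem.Dict.getD (PySem.Dict.mk properties) "P39" [] = claims := by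
      simp [PySem.Dict.getD, hg]
    rw [hd, p39_scan_flags]
    exact (p39_foldl_flags claims false false).trans (by simp)
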